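-- pv_equiv track=rewrite | github.com/djlynn03/wordle-ai | python/main.py | isBlimp
-- ===== SOURCE A (Python) =====
-- import math
--
-- def isBlimp(wordList):   #returns whether or not a word list has the "blimp problem"
--     if len(wordList) > 10 or len(wordList) < 3:
--         return False
--     threshold = math.floor(len(wordList)/2)
--     commonLettersDict = {}
--     for word1 in wordList:
--         for word2 in wordList:
--             if word2 == word1:
--                 continue
--             if len(list(set(word1) & set(word2))) >= 3: # if words have at least 3 letters in common
--                 commonLetters = ""
--                 for letters in list(set(word1) & set(word2)):
--                     commonLetters += letters
--                 commonLetters = "".join(sorted(commonLetters))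
--                 try:
--                     commonLettersDict[commonLetters] += 1
--                     if commonLettersDict[commonLetters] >= threshold:
--                         return True
--                 except:
--                     commonLettersDict[commonLetters] = 1
--     return False
-- ===== SOURCE B (Python) =====
-- def isBlimp(wordList):
--     n = len(wordList)
--     if n > 10 or n < 3:
--         return False
--     # 2*u >= floor(n/2)  <=>  u >= ceil(floor(n/2)/2); each unordered pair stands
--     # for two of A's ordered pairs.
--     need = (n // 2 + 1) // 2
--     sigs = sorted(
--         "".join(sorted(set(w1) & set(w2)))
--         for i, w1 in enumerate(wordList)
--         for w2 in wordList[i + 1:]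
--         if w1 != w2 and len(set(w1) & set(w2)) >= 3
--     )
--     # longest run of equal signatures in the sorted list = max multiplicity
--     run = best = 0
--     prev = None
--     for s in sigs:
--         run = run + 1 if s == prev else 1
--         prev = s
--         if run > best:
--             best = run
--     return best >= need
-- ===== Notes on version B (the rewrite author's own statement) =====
-- stated objective: alternative
-- what changed: B replaces A's ordered-pair loop with try/except dict counting and an early return by: generate each unordered pair's signature once into a list, sort it, and find the longest run of equal signatures by a linear scan, comparing it against the halved (ceiling) threshold - no dict, sort-then-scan grouping instead of hash counting.
import Mathlib
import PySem

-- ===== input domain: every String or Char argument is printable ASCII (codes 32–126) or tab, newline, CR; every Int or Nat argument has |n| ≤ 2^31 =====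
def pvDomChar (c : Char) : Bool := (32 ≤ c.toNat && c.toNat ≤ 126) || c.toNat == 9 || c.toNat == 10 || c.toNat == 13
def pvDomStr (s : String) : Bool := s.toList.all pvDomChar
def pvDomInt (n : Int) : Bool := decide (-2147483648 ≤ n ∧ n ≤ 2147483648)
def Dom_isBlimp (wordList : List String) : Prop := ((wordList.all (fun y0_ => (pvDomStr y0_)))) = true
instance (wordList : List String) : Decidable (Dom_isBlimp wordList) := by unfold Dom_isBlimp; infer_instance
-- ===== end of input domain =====

-- B generates each unordered pair's signature once into a list, sorts it, and scans for the
-- longest run of equal signatures against the halved (ceiling) threshold — no dict, no early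
-- return; return value proved equal to A's.

-- ===== PORT A =====
-- set(word1) & set(word2)
def interA (word1 word2 : String) : PySem.Set Char :=
  PySem.Set.inter (PySem.Set.ofList word1.toList) (PySem.Set.ofList word2.toList)

-- commonLetters built by '+=' over list(set(word1) & set(word2)) (an unspecified hash order),
-- then '"".join(sorted(commonLetters))': the final sort makes the result order-independent,
-- so folding in the Set's stored order is exact.
def sigA (word1 word2 : String) : String :=
  let commonLetters := (interA word1 word2).foldl (fun acc c => acc ++ [c]) ([] : List Char)
  String.ofList (PySem.List.sorted commonLetters (fun x => x) false)

-- inner 'for word2 in wordList' loop; 'none' = the 'return True' was taken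
def innerA (threshold : Int) (word1 : String) :
    List String → PySem.Dict String Int → Option (PySem.Dict String Int)
  | [], d => some d
  | word2 :: rest, d =>
    if word2 = word1 then innerA threshold word1 rest d
    else if 3 ≤ (interA word1 word2).length then
      let commonLetters := sigA word1 word2
      match d.get? commonLetters with
      | some c =>          -- try: increment succeeded, then the threshold test
        if threshold ≤ c + 1 then none
        else innerA threshold word1 rest (d.insert commonLetters (c + 1))
      | none =>            -- except: first occurrence
        innerA threshold word1 rest (d.insert commonLetters 1)
    else innerA threshold word1 rest d

-- outer 'for word1 in wordList' loop
def outerA (threshold : Int) : List String → List String → PySem.Dict String Int → Bool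
  | [], _, _ => false
  | word1 :: rest, all, d =>
    match innerA threshold word1 all d with
    | none => true
    | some d' => outerA threshold rest all d'

def isBlimp (wordList : List String) : Bool :=
  if 10 < wordList.length ∨ wordList.length < 3 then false
  else
    -- math.floor(len(wordList)/2) = len(wordList) // 2 exactly (len ≤ 10, nonnegative)
    let threshold : Int := PySem.Int.floordiv (wordList.length : Int) 2
    outerA threshold wordList wordList PySem.Dict.empty

-- ===== PORT B =====
-- '"".join(sorted(set(w1) & set(w2)))' — sorted() of the set; set(w1) & set(w2) is the
-- same expression as in A, so the shared helper interA is reused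
def sigB (w1 w2 : String) : String :=
  String.ofList (PySem.List.sorted (interA w1 w2) (fun x => x) false)

-- the generator expression: for i, w1 in enumerate(wordList); for w2 in wordList[i+1:];
-- if w1 != w2 and len(set(w1) & set(w2)) >= 3: yield the signature
def genB : List String → List String
  | [] => []
  | w1 :: rest =>
    rest.filterMap (fun w2 =>
      if w1 ≠ w2 ∧ 3 ≤ (interA w1 w2).length then some (sigB w1 w2) else none) ++ genB rest

-- loop body of 'for s in sigs': run = run + 1 if s == prev else 1; prev = s; if run > best: best = run
def stepB : Option String × Int × Int → String → Option String × Int × Int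
  | (prev, run, best), s =>
    (some s, if prev = some s then run + 1 else 1,
      if best < (if prev = some s then run + 1 else 1) then (if prev = some s then run + 1 else 1)
      else best)

def isBlimp_alt (wordList : List String) : Bool :=
  let n := wordList.length
  if 10 < n ∨ n < 3 then false
  else
    -- need = (n // 2 + 1) // 2
    let need : Int := PySem.Int.floordiv (PySem.Int.floordiv (n : Int) 2 + 1) 2
    let sigs := PySem.List.sorted (genB wordList) (fun x => x) false
    -- run = best = 0; prev = None; for s in sigs: …
    let st := sigs.foldl stepB ((none : Option String), (0 : Int), (0 : Int))
    decide (need ≤ st.2.2)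

-- ===== PRECONDITION & SPEC =====
def Spec_isBlimp (wordList : List String) (out : Bool) : Prop := out = isBlimp_alt wordList
instance (wordList : List String) (out : Bool) : Decidable (Spec_isBlimp wordList out) := by unfold Spec_isBlimp; infer_instance

-- ===== CLAIM (what is proved, stated in full; the proofs are below) =====
def Claim_equal_isBlimp : Prop := ∀ (wordList : List String), Dom_isBlimp wordList → Spec_isBlimp wordList (isBlimp wordList)

-- ===== LEMMAS AND PROOFS =====

def pvG (a b : String) : Option String :=
  if b = a then none
  else if 3 ≤ (interA a b).length then some (sigA a b) else none

def pvStrm (a : String) (ws : List String) : List String := ws.filterMap (pvG a)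

def pvU : List String → List String
  | [] => []
  | a :: t => pvStrm a t ++ pvU t

def pvSS (l : List String) : List String := l.flatMap (fun a => pvStrm a l)

def pvProcA (threshold : Int) : List String → PySem.Dict String Int → Option (PySem.Dict String Int)
  | [], d => some d
  | s :: rest, d =>
    match d.get? s with
    | some c => if threshold ≤ c + 1 then none else pvProcA threshold rest (d.insert s (c + 1))
    | none => pvProcA threshold rest (d.insert s 1)

def pvTrig (threshold : Int) (d : PySem.Dict String Int) (stream : List String) (s : String) : Prop :=
  1 ≤ stream.count s ∧ threshold ≤ d.getD s 0 + (stream.count s : Int)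
    ∧ (d.contains s = true ∨ 2 ≤ stream.count s)

theorem innerA_eq_procA (threshold : Int) (word1 : String) (ws : List String)
    (d : PySem.Dict String Int) :
    innerA threshold word1 ws d = pvProcA threshold (pvStrm word1 ws) d := by
  induction ws generalizing d with
  | nil => rfl
  | cons w2 rest ih =>
    simp only [innerA, pvStrm, List.filterMap_cons, pvG]
    split_ifs with h1 h2
    · exact ih d
    · simp only [pvProcA]
      cases h : d.get? (sigA word1 w2) with
      | some c =>
        dsimp only
        split_ifs with h3
        · rfl
        · exact ih _
      | none => exact ih _
    · exact ih d

theorem procA_append (threshold : Int) (xs ys : List String) (d : PySem.Dict String Int) :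
    pvProcA threshold (xs ++ ys) d = (pvProcA threshold xs d).bind (pvProcA threshold ys) := by
  induction xs generalizing d with
  | nil => rfl
  | cons s rest ih =>
    simp only [List.cons_append, pvProcA]
    cases h : d.get? s with
    | some c =>
      dsimp only
      split_ifs with h3
      · rfl
      · exact ih _
    | none => exact ih _

theorem outerA_eq (threshold : Int) (ws all : List String) (d : PySem.Dict String Int) :
    outerA threshold ws all d
      = ((pvProcA threshold (ws.flatMap (fun a => pvStrm a all)) d).isNone) := by
  induction ws generalizing d with
  | nil => rfl
  | cons a rest ih =>
    simp only [outerA, List.flatMap_cons, procA_append, innerA_eq_procA]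
    cases pvProcA threshold (pvStrm a all) d with
    | none => rfl
    | some d' => exact ih d'

theorem procA_none_iff (threshold : Int) (stream : List String) (d : PySem.Dict String Int) :
    pvProcA threshold stream d = none ↔ ∃ s, pvTrig threshold d stream s := by
  induction stream generalizing d with
  | nil => simp [pvProcA, pvTrig]
  | cons s0 rest ih =>
    simp only [pvProcA]
    cases h : d.get? s0 with
    | some c =>
      have hc : d.contains s0 = true := by
        rcases hb : d.contains s0 with _ | _
        · rw [← (PySem.Dict.get?_eq_none_iff_contains d s0)] at hb; rw [h] at hb; cases hb
        · rfl
      have hg : d.getD s0 0 = c := PySem.Dict.getD_of_get?_eq_some d 0 h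
      dsimp only
      split_ifs with h3
      · constructor
        · intro _
          refine ⟨s0, ?_⟩
          simp only [pvTrig, List.count_cons_self, hg, hc, true_or, and_true]
          push_cast
          simp only [true_and]
          omega
        · intro _; rfl
      · rw [ih]
        apply exists_congr
        intro s
        by_cases hss : s = s0
        · subst hss
          simp only [pvTrig, PySem.Dict.getD_insert_self, PySem.Dict.contains_insert_self,
            List.count_cons_self, hg, hc, true_or, and_true]
          push_cast
          simp only [true_and]
          omega
        · simp only [pvTrig, PySem.Dict.getD_insert_of_ne _ _ _ hss,
            PySem.Dict.contains_insert, List.count_cons_of_ne (Ne.symm hss)]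
          simp [hss]
    | none =>
      have hc : d.contains s0 = false := (PySem.Dict.get?_eq_none_iff_contains d s0).mp h
      have hg : d.getD s0 0 = 0 := PySem.Dict.getD_of_not_contains d 0 hc
      dsimp only
      rw [ih]
      apply exists_congr
      intro s
      by_cases hss : s = s0
      · subst hss
        simp only [pvTrig, PySem.Dict.getD_insert_self, PySem.Dict.contains_insert_self,
          List.count_cons_self, hg, hc, true_or, and_true, Bool.false_eq_true, false_or]
        push_cast
        simp only [true_and]
        omega
      · simp only [pvTrig, PySem.Dict.getD_insert_of_ne _ _ _ hss,
          PySem.Dict.contains_insert, List.count_cons_of_ne (Ne.symm hss)]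
        simp [hss]

theorem sigA_eq_sigB (w1 w2 : String) : sigA w1 w2 = sigB w1 w2 := by
  simp only [sigA, sigB, PySem.List.foldl_append_singleton, List.nil_append]

theorem genB_eq_pvU (l : List String) : genB l = pvU l := by
  induction l with
  | nil => rfl
  | cons a t ih =>
    simp only [genB, pvU, ih, pvStrm]
    congr 1
    apply List.filterMap_congr
    intro b _
    simp only [pvG, sigA_eq_sigB]
    by_cases h1 : b = a
    · subst h1; simp
    · rw [if_neg h1]
      by_cases h2 : 3 ≤ (interA a b).length
      · rw [if_pos h2, if_pos ⟨fun h => h1 h.symm, h2⟩]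
      · rw [if_neg h2, if_neg (fun h => h2 h.2)]

theorem interA_mem (a b : String) (x : Char) :
    x ∈ interA a b ↔ x ∈ a.toList ∧ x ∈ b.toList := by
  simp [interA, PySem.Set.mem_inter, PySem.Set.mem_ofList]

theorem interA_nodup (a b : String) : (interA a b).Nodup :=
  PySem.Set.nodup_inter _ _ (PySem.Set.nodup_ofList _)

theorem interA_perm (a b : String) : (interA a b).Perm (interA b a) := by
  rw [List.perm_ext_iff_of_nodup (interA_nodup a b) (interA_nodup b a)]
  intro x
  rw [interA_mem, interA_mem]
  tauto

theorem sigA_symm (a b : String) : sigA a b = sigA b a := by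
  simp only [sigA, PySem.List.foldl_append_singleton, List.nil_append]
  congr 1
  exact PySem.List.sorted_eq_sorted_of_perm _ _ _ (fun x y h => h) (interA_perm a b)

theorem pvG_symm (a b : String) : pvG a b = pvG b a := by
  unfold pvG
  by_cases h : b = a
  · simp [h]
  · have h' : ¬ a = b := fun hh => h hh.symm
    rw [if_neg h, if_neg h', (interA_perm b a).length_eq, sigA_symm b a]

theorem count_flatMap' (f : String → List String) (l : List String) (s : String) :
    ((l.flatMap f).count s) = (l.map (fun b => (f b).count s)).sum := by
  induction l with
  | nil => rfl
  | cons a t ih => simp [List.count_append, ih]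

theorem count_strm_cons (a b : String) (t : List String) (s : String) :
    (pvStrm a (b :: t)).count s
      = (if pvG a b = some s then 1 else 0) + (pvStrm a t).count s := by
  simp only [pvStrm, List.filterMap_cons]
  cases h : pvG a b with
  | none => simp
  | some x =>
    by_cases hx : x = s
    · subst hx; simp [List.count_cons_self, Nat.add_comm]
    · simp [hx]

theorem count_strm (a : String) (t : List String) (s : String) :
    (pvStrm a t).count s = (t.map (fun b => if pvG a b = some s then 1 else 0)).sum := by
  induction t with
  | nil => rfl
  | cons b t ih => rw [count_strm_cons, ih]; simp

theorem count_SS (l : List String) (s : String) :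
    (pvSS l).count s = 2 * (pvU l).count s := by
  induction l with
  | nil => rfl
  | cons a t ih =>
    have hga : pvG a a = none := by simp [pvG]
    simp only [pvSS, List.flatMap_cons, List.count_append, count_strm_cons, hga]
    simp only [count_flatMap']
    have hmap : ∀ b, (pvStrm b (a :: t)).count s
        = (if pvG a b = some s then 1 else 0) + (pvStrm b t).count s := by
      intro b; rw [count_strm_cons, pvG_symm b a]
    rw [List.map_congr_left (fun b _ => hmap b), List.sum_map_add]
    simp only [pvU, List.count_append, ← count_strm]
    simp only [reduceCtorEq, if_false]
    simp only [pvSS] at ih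
    rw [count_flatMap'] at ih
    omega

-- ---- B-side: the sorted run-length scan finds the maximal multiplicity ----

-- a sorted list starts with a block of copies of its head
theorem sorted_decomp (a : String) (t : List String)
    (h : (a :: t).Pairwise (· ≤ ·)) :
    ∃ t', t = List.replicate (t.count a) a ++ t' ∧ a ∉ t' ∧ t'.Pairwise (· ≤ ·) := by
  induction t with
  | nil => exact ⟨[], by simp, by simp, List.Pairwise.nil⟩
  | cons x t2 ih =>
    have hax : a ≤ x := (List.pairwise_cons.mp h).1 x (List.mem_cons_self)
    have hxt : (x :: t2).Pairwise (· ≤ ·) := (List.pairwise_cons.mp h).2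
    by_cases hxa : x = a
    · subst hxa
      have h2 : (x :: t2).Pairwise (· ≤ ·) := hxt
      obtain ⟨t', ht, hnot, hp⟩ := ih (by
        refine List.pairwise_cons.mpr ⟨?_, (List.pairwise_cons.mp hxt).2⟩
        exact (List.pairwise_cons.mp hxt).1)
      refine ⟨t', ?_, hnot, hp⟩
      rw [List.count_cons_self, ht]
      simp [List.replicate_succ, List.count_eq_zero.mpr hnot]
    · have hna : a ∉ x :: t2 := by
        intro hmem
        rcases List.mem_cons.mp hmem with h1 | h1
        · exact hxa h1.symm
        · have hxa' : x ≤ a := (List.pairwise_cons.mp hxt).1 a h1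
          exact hxa (le_antisymm hxa' hax)
      refine ⟨x :: t2, ?_, hna, hxt⟩
      have : (x :: t2).count a = 0 := List.count_eq_zero.mpr hna
      simp [this]

theorem foldl_stepB_replicate (k : Nat) (a : String) (r b : Int) (hrb : r ≤ b) :
    (List.replicate k a).foldl stepB (some a, r, b)
      = (some a, r + k, if b < r + k then r + k else b) := by
  induction k generalizing r b with
  | zero =>
    simp only [List.replicate, List.foldl_nil, Nat.cast_zero, add_zero]
    rw [if_neg (by omega)]
  | succ k ih =>
    simp only [List.replicate_succ, List.foldl_cons]
    have hstep : stepB (some a, r, b) a = (some a, r + 1, if b < r + 1 then r + 1 else b) := by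
      simp [stepB]
    rw [hstep, ih (r + 1) _ (by split_ifs <;> omega)]
    simp only [Prod.mk.injEq, true_and]
    constructor
    · push_cast; ring
    · split_ifs <;> push_cast at * <;> omega

theorem scan_best (L : List String) (hL : L.Pairwise (· ≤ ·)) :
    ∀ (p : Option String) (r b : Int), (∀ s, p = some s → s ∉ L) → r ≤ b →
      ∀ need : Int,
        (need ≤ (L.foldl stepB (p, r, b)).2.2
          ↔ need ≤ b ∨ ∃ s ∈ L, need ≤ (L.count s : Int)) := by
  induction hn : L.length using Nat.strong_induction_on generalizing L with
  | _ n ih =>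
    cases L with
    | nil => intro p r b _ _ need; simp
    | cons a t =>
      intro p r b hp hrb need
      obtain ⟨t', ht, hnot, hpair⟩ := sorted_decomp a t hL
      set k := t.count a with hk
      have hLeq : a :: t = List.replicate (k + 1) a ++ t' := by
        rw [List.replicate_succ, List.cons_append, ← ht]
      have hcntL : (a :: t).count a = k + 1 := by rw [List.count_cons_self]
      have hpa : p ≠ some a := fun hpa => hp a hpa List.mem_cons_self
      set b1 : Int := if b < 1 then 1 else b with hb1
      have hd1 : b1 = 1 ∨ b1 = b := by rw [hb1]; split_ifs <;> simp
      have hb1ge : 1 ≤ b1 ∧ b ≤ b1 := by rw [hb1]; constructor <;> (split_ifs <;> omega)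
      have hstep1 : stepB (p, r, b) a = (some a, 1, b1) := by
        simp [stepB, hpa, hb1]
      set b2 : Int := if b1 < 1 + (k : Int) then 1 + (k : Int) else b1 with hb2
      have hd2 : b2 = 1 + (k : Int) ∨ b2 = b1 := by rw [hb2]; split_ifs <;> simp
      have hb2ge : 1 + (k : Int) ≤ b2 ∧ b1 ≤ b2 := by rw [hb2]; constructor <;> (split_ifs <;> omega)
      have hfold : (a :: t).foldl stepB (p, r, b) = t'.foldl stepB (some a, 1 + k, b2) := by
        rw [hLeq, List.foldl_append]
        simp only [List.replicate_succ, List.foldl_cons, hstep1]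
        rw [foldl_stepB_replicate k a 1 b1 hb1ge.1]
      rw [hfold]
      have ht'len : t'.length < n := by
        have : t.length = k + t'.length := by
          rw [ht]; simp [List.length_append]
        simp only [List.length_cons] at hn
        omega
      have hih := ih t'.length ht'len t' hpair rfl (some a) (1 + (k : Int)) b2
        (by intro s hs; injection hs with hs; subst hs; exact hnot)
        hb2ge.1 need
      rw [hih]
      have hmemL : ∀ s, s ∈ a :: t ↔ s = a ∨ s ∈ t' := by
        intro s
        rw [hLeq, List.mem_append, List.mem_replicate]
        constructor
        · rintro (⟨_, h⟩ | h); exact Or.inl h; exact Or.inr h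
        · rintro (h | h); exact Or.inl ⟨by omega, h⟩; exact Or.inr h
      have hcnt' : ∀ s ∈ t', (a :: t).count s = t'.count s := by
        intro s hs
        have hsa : s ≠ a := fun h => hnot (h ▸ hs)
        rw [hLeq, List.count_append]
        simp [List.count_replicate, Ne.symm hsa]
      constructor
      · rintro (h | ⟨s, hs, hcs⟩)
        · by_cases hnb : need ≤ b
          · exact Or.inl hnb
          · right
            refine ⟨a, List.mem_cons_self, ?_⟩
            rw [hcntL]; push_cast; omega
        · right
          exact ⟨s, (hmemL s).mpr (Or.inr hs), by rw [hcnt' s hs]; exact hcs⟩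
      · rintro (h | ⟨s, hs, hcs⟩)
        · left; omega
        · rcases (hmemL s).mp hs with hsa | hst'
          · subst hsa
            rw [hcntL] at hcs
            left
            push_cast at hcs ⊢
            omega
          · right; exact ⟨s, hst', by rw [← hcnt' s hst']; exact hcs⟩

-- final pieces

theorem isBlimp_eq (wordList : List String) : isBlimp wordList = isBlimp_alt wordList := by
  simp only [isBlimp, isBlimp_alt]
  by_cases hg : 10 < wordList.length ∨ wordList.length < 3
  · rw [if_pos hg, if_pos hg]
  · rw [if_neg hg, if_neg hg]
    rw [not_or, not_lt, not_lt] at hg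
    obtain ⟨hle, hge⟩ := hg
    set n := wordList.length with hn
    rw [Bool.eq_iff_iff]
    -- A side
    rw [outerA_eq, Option.isNone_iff_eq_none, procA_none_iff]
    -- B side
    have hthr : PySem.Int.floordiv (n : Int) 2 = ((n / 2 : Nat) : Int) :=
      PySem.Int.floordiv_natCast n 2
    have hneed : PySem.Int.floordiv (PySem.Int.floordiv (n : Int) 2 + 1) 2
        = (((n / 2 + 1) / 2 : Nat) : Int) := by
      rw [hthr]
      have h1 : ((n / 2 : Nat) : Int) + 1 = ((n / 2 + 1 : Nat) : Int) := by push_cast; ring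
      rw [h1]
      exact_mod_cast PySem.Int.floordiv_natCast (n / 2 + 1) 2
    set L := PySem.List.sorted (genB wordList) (fun x => x) false with hL
    have hpair : L.Pairwise (· ≤ ·) := PySem.List.sorted_pairwise _ _
    have hperm : L.Perm (pvU wordList) := by
      rw [hL, genB_eq_pvU]; exact PySem.List.sorted_perm _ _ _
    have hcount : ∀ s, L.count s = (pvU wordList).count s := fun s => hperm.count_eq s
    have hscan := scan_best L hpair none 0 0 (by intro s h; cases h) (le_refl 0)
      (((n / 2 + 1) / 2 : Nat) : Int)
    simp only [decide_eq_true_eq, hneed]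
    rw [hscan]
    have hnotb : ¬ (((n / 2 + 1) / 2 : Nat) : Int) ≤ 0 := by
      have : 1 ≤ (n / 2 + 1) / 2 := by omega
      push_cast; omega
    rw [show List.flatMap (fun a => pvStrm a wordList) wordList = pvSS wordList from rfl]
    constructor
    · rintro ⟨s, h1, h2, h3⟩
      simp only [PySem.Dict.getD_empty, PySem.Dict.contains_empty, zero_add,
        Bool.false_eq_true, false_or] at h2 h3
      have hss := count_SS wordList s
      have h2' : n / 2 ≤ (pvSS wordList).count s := by
        rw [hthr] at h2; exact_mod_cast h2
      right
      have hmem : 0 < L.count s := by rw [hcount]; omega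
      refine ⟨s, List.count_pos_iff.mp hmem, ?_⟩
      rw [hcount]
      exact_mod_cast show (n / 2 + 1) / 2 ≤ (pvU wordList).count s by omega
    · rintro (h | ⟨s, hs, hcs⟩)
      · exact absurd h hnotb
      · refine ⟨s, ?_⟩
        have huc : 0 < (pvU wordList).count s := by
          rw [← hcount]; exact List.count_pos_iff.mpr hs
        have hss := count_SS wordList s
        have hcs' : (n / 2 + 1) / 2 ≤ (pvU wordList).count s := by
          rw [hcount] at hcs; exact_mod_cast hcs
        simp only [pvTrig, PySem.Dict.getD_empty, PySem.Dict.contains_empty, zero_add,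
          Bool.false_eq_true, false_or]
        refine ⟨by omega, ?_, by omega⟩
        rw [hthr]
        exact_mod_cast show n / 2 ≤ (pvSS wordList).count s by omega

-- ===== VERDICT (by name: the statement is the Claim_ definition above) =====
theorem isBlimp_spec : Claim_equal_isBlimp := by
  intro wordList _
  show isBlimp wordList = isBlimp_alt wordList
  exact isBlimp_eq wordList
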